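-- pv_equiv track=rewrite | github.com/MeanMachine0/battleships | components.py | get_possible_placements
-- ===== SOURCE A (Python) =====
-- def get_possible_placements(board, size) -> list[(int, int, str)]:
--     """Returns possible placements in the form (x, y, orientation)."""
--     possible_placements = []
--     for y, row in enumerate(board):
--         for x in range(len(board) - size + 1):
--             if row[x:x + size] == [None] * size:
--                 # places rightwards from (x, y):
--                 possible_placements.append((x, y, 'h'))
--             if [board[i][y] for i in range(x, x + size)] == [None] * size:
--                 # places upwards from (y, x):
--                 possible_placements.append((y, x, 'v'))
--     return possible_placements
-- ===== SOURCE B (Python) =====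
-- def get_possible_placements(board, size) -> list[(int, int, str)]:
--     """Returns possible placements in the form (x, y, orientation)."""
--     n = len(board)
--     if n < size:
--         return []  # no window of that length fits; skip building the tables
--
--     def runs(cells):
--         # out[i] = length of the run of None starting at cells[i]
--         out = [0] * (len(cells) + 1)
--         for i in range(len(cells) - 1, -1, -1):
--             out[i] = out[i + 1] + 1 if cells[i] is None else 0
--         return out
--
--     hruns = [runs(row[:n]) for row in board]
--     vruns = [runs(col) for col in zip(*board)]
--     res = []
--     for y in range(n):
--         for x in range(n - size + 1):
--             if hruns[y][x] >= size:
--                 res.append((x, y, 'h'))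
--             if vruns[y][x] >= size:
--                 res.append((y, x, 'v'))
--     return res
-- ===== Notes on version B (the rewrite author's own statement) =====
-- stated objective: alternative
-- what changed: Instead of re-checking a length-`size` window of cells for every (x,y) and orientation (A slices the row and rebuilds the column segment each time), B precomputes, by one backward pass per row and per zip-transposed column, the length of the run of None starting at every cell, so each placement test is a single comparison run >= size.
import Mathlib
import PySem

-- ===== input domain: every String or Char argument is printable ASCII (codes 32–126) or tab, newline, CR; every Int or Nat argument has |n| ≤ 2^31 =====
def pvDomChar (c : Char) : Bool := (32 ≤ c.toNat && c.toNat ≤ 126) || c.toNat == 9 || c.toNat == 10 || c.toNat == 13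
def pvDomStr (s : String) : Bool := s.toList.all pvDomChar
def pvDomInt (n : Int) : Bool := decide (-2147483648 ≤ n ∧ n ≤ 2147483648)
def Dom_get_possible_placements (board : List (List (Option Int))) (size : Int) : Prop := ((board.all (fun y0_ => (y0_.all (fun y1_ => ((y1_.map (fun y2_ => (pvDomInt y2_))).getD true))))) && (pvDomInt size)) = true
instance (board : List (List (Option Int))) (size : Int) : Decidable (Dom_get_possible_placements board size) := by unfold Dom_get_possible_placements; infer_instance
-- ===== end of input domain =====

-- B replaces A's per-placement window re-check (a slice / rebuilt column segment per (x,y))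
-- with precomputed None-run-length tables per row and per column, a single comparison per test.


-- ===== PORT A =====
-- literal transliteration of A: for y,row in enumerate(board): for x in range(len(board)-size+1):
--   row[x:x+size] == [None]*size ; [board[i][y] for i in range(x,x+size)] == [None]*size
-- (each board[i][y] is the raising access, ported as pyGet?-bind-pyGet?; a raising access
--  compares unequal to `some none`, and such inputs are excluded by Pre_ anyway)
def get_possible_placements (board : List (List (Option Int))) (size : Int) : List (Int × Int × String) :=
  (PySem.List.enumerate board 0).foldl (fun acc yr =>
    (PySem.List.pyRange 0 ((board.length : Int) - size + 1) 1).foldl (fun acc2 x =>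
      let acc3 := if PySem.List.slice yr.2 (some x) (some (x + size)) = List.replicate size.toNat (none : Option Int)
        then acc2 ++ [(x, yr.1, "h")] else acc2
      if (PySem.List.pyRange x (x + size) 1).map
           (fun i => (PySem.List.pyGet? board i).bind (fun r => PySem.List.pyGet? r yr.1))
         = List.replicate size.toNat (some (none : Option Int))
        then acc3 ++ [(yr.1, x, "v")] else acc3) acc) []

-- ===== PORT B =====
-- Source B's runs(cells): an array of length len(cells)+1 filled right-to-left; the same backward
-- computation as a structural foldr (out[i] = out[i+1]+1 if cells[i] is None else 0).
def pvRuns (cells : List (Option Int)) : List Int :=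
  cells.foldr (fun c rest => (if c = none then rest.headD 0 + 1 else 0) :: rest) [0]

-- hruns = [runs(row[:n]) for row in board]
def pvHruns (board : List (List (Option Int))) : List (List Int) :=
  board.map (fun row => pvRuns (PySem.List.slice row none (some (board.length : Int))))

-- zip(*board): one list per column index below the SHORTEST row, each holding that column's
-- cell of every row (exact model of Python's truncating zip over the unpacked rows)
def pvCols (board : List (List (Option Int))) : List (List (Option Int)) :=
  (List.range ((board.map (fun r => r.length)).min?.getD 0)).map (fun y =>
    board.map (fun r => r.getD y none))

-- vruns = [runs(col) for col in zip(*board)]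
def pvVruns (board : List (List (Option Int))) : List (List Int) :=
  (pvCols board).map (fun col => pvRuns col)

def get_possible_placements_alt (board : List (List (Option Int))) (size : Int) : List (Int × Int × String) :=
  if (board.length : Int) < size then [] else
  (PySem.List.pyRange 0 (board.length : Int) 1).foldl (fun acc y =>
    (PySem.List.pyRange 0 ((board.length : Int) - size + 1) 1).foldl (fun acc2 x =>
      let acc3 := if size ≤ PySem.List.pyGetD (PySem.List.pyGetD (pvHruns board) y []) x 0
        then acc2 ++ [(x, y, "h")] else acc2
      if size ≤ PySem.List.pyGetD (PySem.List.pyGetD (pvVruns board) y []) x 0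
        then acc3 ++ [(y, x, "v")] else acc3) acc) []

-- ===== PRECONDITION & SPEC =====
-- Pre_ excludes (a) negative sizes, outside the natural domain (a ship has positive size),
-- where A's empty-slice comparison vacuously appends placements beyond the board while B's
-- table indexing raises IndexError, and (b) boards with a row shorter than len(board) when
-- size ≤ len(board): there A's column access board[i][y] raises IndexError for 1 ≤ size
-- (and for size = 0 A returns a degenerate placement list while B's table indexing raises).
def Pre_get_possible_placements (board : List (List (Option Int))) (size : Int) : Prop :=
  0 ≤ size ∧ (size ≤ (board.length : Int) → ∀ row ∈ board, board.length ≤ row.length)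
instance (board : List (List (Option Int))) (size : Int) : Decidable (Pre_get_possible_placements board size) := by unfold Pre_get_possible_placements; infer_instance

def pvWitness_get_possible_placements : List (List (Option Int)) × Int :=
  ([[none, some 1], [none, none]], 2)

def Spec_get_possible_placements (board : List (List (Option Int))) (size : Int) (out : List (Int × Int × String)) : Prop := out = get_possible_placements_alt board size
instance (board : List (List (Option Int))) (size : Int) (out : List (Int × Int × String)) : Decidable (Spec_get_possible_placements board size out) := by unfold Spec_get_possible_placements; infer_instance

-- ===== CLAIM (what is proved, stated in full; the proofs are below) =====
def Claim_equal_get_possible_placements : Prop := ∀ (board : List (List (Option Int))) (size : Int), Dom_get_possible_placements board size → Pre_get_possible_placements board size → Spec_get_possible_placements board size (get_possible_placements board size)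

-- ===== LEMMAS AND PROOFS =====

theorem pvRuns_ne_nil (cs : List (Option Int)) : pvRuns cs ≠ [] := by
  cases cs <;> simp [pvRuns]

theorem pvRuns_cons (c : Option Int) (cs : List (Option Int)) :
    pvRuns (c :: cs) = (if c = none then (pvRuns cs).headD 0 + 1 else 0) :: pvRuns cs := rfl

theorem pvRuns_headD_mem (cs : List (Option Int)) : (pvRuns cs).headD 0 ∈ pvRuns cs := by
  rcases List.exists_cons_of_ne_nil (pvRuns_ne_nil cs) with ⟨a, t, he⟩
  rw [he]; simp

theorem pvRuns_nonneg (cs : List (Option Int)) : ∀ v ∈ pvRuns cs, 0 ≤ v := by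
  induction cs with
  | nil => intro v hv; simp [pvRuns] at hv; omega
  | cons c cs ih =>
    intro v hv
    rw [pvRuns_cons] at hv
    rcases List.mem_cons.1 hv with h | h
    · subst h
      split
      · have := ih _ (pvRuns_headD_mem cs); omega
      · omega
    · exact ih _ h

-- core characterisation: runs[j] ≥ k ↔ the k cells starting at j are all None
theorem pvRuns_getD_ge_iff (cs : List (Option Int)) (j k : Nat) (hjk : j + k ≤ cs.length) :
    ((k : Int) ≤ (pvRuns cs).getD j 0) ↔ ∀ t : Nat, t < k → cs.getD (j + t) none = none := by
  induction cs generalizing j k with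
  | nil =>
    simp only [List.length_nil, Nat.le_zero] at hjk
    have hj : j = 0 := by omega
    have hk : k = 0 := by omega
    subst hj; subst hk
    simp [pvRuns]
  | cons c cs ih =>
    cases j with
    | zero =>
      rw [pvRuns_cons]
      have hhead : (pvRuns cs).headD 0 = (pvRuns cs).getD 0 0 := by
        rcases List.exists_cons_of_ne_nil (pvRuns_ne_nil cs) with ⟨a, t, he⟩
        simp [he]
      cases k with
      | zero =>
        constructor
        · intro _ t ht; omega
        · intro _
          simp only [List.getD_cons_zero]
          split
          · have := pvRuns_nonneg cs _ (pvRuns_headD_mem cs)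
            rw [hhead] at this; omega
          · omega
      | succ k' =>
        simp only [List.getD_cons_zero]
        by_cases hc : c = none
        · simp only [hc, if_true]
          rw [hhead]
          have hiter := ih 0 k' (by simp at hjk ⊢; omega)
          simp only [Nat.zero_add] at hiter ⊢
          constructor
          · intro hge t ht
            cases t with
            | zero => simp
            | succ t' => simpa [List.getD_cons_succ] using hiter.1 (by omega) t' (by omega)
          · intro hall
            have : (k' : Int) ≤ (pvRuns cs).getD 0 0 := by
              apply hiter.2
              intro t ht
              simpa [List.getD_cons_succ] using hall (t + 1) (by omega)
            push_cast
            omega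
        · simp only [if_neg hc]
          constructor
          · intro hge; exfalso; push_cast at hge; omega
          · intro hall
            exfalso
            exact hc (by simpa using hall 0 (by omega))
    | succ j' =>
      rw [pvRuns_cons]
      simp only [List.getD_cons_succ]
      have := ih j' k (by simp at hjk; omega)
      simpa [Nat.succ_add] using this

-- take of a drop equals replicate ↔ pointwise None
theorem drop_take_eq_replicate_iff (l : List (Option Int)) (j k : Nat) (hjk : j + k ≤ l.length) :
    ((l.drop j).take k = List.replicate k (none : Option Int)) ↔
      ∀ t : Nat, t < k → l.getD (j + t) none = none := by
  constructor
  · intro h t ht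
    have hlen : t < ((l.drop j).take k).length := by simp; omega
    have : ((l.drop j).take k)[t]'hlen = none := by
      simp only [h] at hlen ⊢
      simp
    rw [List.getElem_take, List.getElem_drop] at this
    rw [List.getD_eq_getElem l none (by omega)]
    exact this
  · intro h
    apply List.ext_getElem (by simp; omega)
    intro i h1 h2
    rw [List.getElem_take, List.getElem_drop, List.getElem_replicate]
    have hi : i < k := by simpa using h2
    have := h i hi
    rwa [List.getD_eq_getElem l none (by omega)] at this

theorem getD_take_eq {α : Type} (l : List α) (nn i : Nat) (d : α) (hi : i < nn) (hn : nn ≤ l.length) :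
    (l.take nn).getD i d = l.getD i d := by
  rw [List.getD_eq_getElem _ _ (by simp; omega), List.getD_eq_getElem _ _ (by omega),
    List.getElem_take]

theorem map_pyRange_eq_replicate_iff {α : Type} (f : Int → α) (a : Int) (m : Nat) (v : α) :
    ((PySem.List.pyRange a (a + m) 1).map f = List.replicate m v) ↔
      ∀ j : Nat, j < m → f (a + j) = v := by
  rw [PySem.List.pyRange_one, List.map_map]
  have hm : (a + m - a).toNat = m := by omega
  rw [hm, List.eq_replicate_iff]
  simp only [List.length_map, List.length_range, true_and]
  constructor
  · intro h j hj
    exact h _ (List.mem_map.2 ⟨j, List.mem_range.2 hj, rfl⟩)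
  · intro h b hb
    rcases List.mem_map.1 hb with ⟨j, hj, rfl⟩
    exact h j (List.mem_range.1 hj)

-- the horizontal conditions of A and B agree
theorem hcond_iff (row : List (Option Int)) (n : Nat) (size x : Int)
    (hsz : 0 ≤ size) (hx : 0 ≤ x) (hxe : x ≤ (n : Int) - size) (hrow : n ≤ row.length) :
    (PySem.List.slice row (some x) (some (x + size)) = List.replicate size.toNat (none : Option Int)) ↔
      (size ≤ PySem.List.pyGetD (pvRuns (PySem.List.slice row none (some (n : Int)))) x 0) := by
  obtain ⟨k, rfl⟩ : ∃ k : Nat, x = (k : Int) := ⟨x.toNat, by omega⟩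
  obtain ⟨s, rfl⟩ : ∃ s : Nat, size = (s : Int) := ⟨size.toNat, by omega⟩
  have hkn : k + s ≤ n := by omega
  rw [PySem.List.slice_natCast_add, PySem.List.slice_to_natCast]
  have htn : ((s : Int)).toNat = s := by omega
  rw [htn]
  rw [drop_take_eq_replicate_iff row k s (by omega)]
  rw [PySem.List.pyGetD_natCast]
  have hlen : (row.take n).length = n := by simp; omega
  rw [pvRuns_getD_ge_iff (row.take n) k s (by omega)]
  constructor
  · intro h t ht
    rw [getD_take_eq row n _ none (by omega) hrow]
    exact h t ht
  · intro h t ht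
    have := h t ht
    rwa [getD_take_eq row n _ none (by omega) hrow] at this

-- the vertical conditions of A and B agree (y = t, a Nat row index)
theorem vcond_iff (board : List (List (Option Int))) (t : Nat) (x size : Int)
    (hsz : 0 ≤ size) (htn : t < board.length)
    (hx0 : 0 ≤ x) (hxe : x ≤ (board.length : Int) - size)
    (hrect : ∀ row ∈ board, board.length ≤ row.length) :
    ((PySem.List.pyRange x (x + size) 1).map
        (fun i => (PySem.List.pyGet? board i).bind (fun r => PySem.List.pyGet? r (t : Int))) =
      List.replicate size.toNat (some (none : Option Int))) ↔
      (size ≤ PySem.List.pyGetD (pvRuns (board.map (fun r => r.getD t none))) x 0) := by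
  obtain ⟨k, rfl⟩ : ∃ k : Nat, x = (k : Int) := ⟨x.toNat, by omega⟩
  obtain ⟨s, rfl⟩ : ∃ s : Nat, size = (s : Int) := ⟨size.toNat, by omega⟩
  have hks : k + s ≤ board.length := by omega
  have htsn : ((s : Int)).toNat = s := by omega
  rw [htsn]
  rw [map_pyRange_eq_replicate_iff _ (k : Int) s (some (none : Option Int))]
  -- evaluate A's accesses
  have hA : ∀ j : Nat, j < s →
      (((PySem.List.pyGet? board ((k : Int) + (j : Int))).bind
        (fun r => PySem.List.pyGet? r (t : Int))) = some (none : Option Int) ↔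
        (board.getD (k + j) []).getD t none = none) := by
    intro j hj
    have h1 : ((k : Int) + (j : Int)) = (((k + j : Nat)) : Int) := by push_cast; ring
    rw [h1, PySem.List.pyGet?_natCast]
    have hlt : k + j < board.length := by omega
    rw [List.getElem?_eq_getElem hlt]
    simp only [Option.bind_some]
    have hmem : board[k + j] ∈ board := List.getElem_mem hlt
    have hlen : t < board[k + j].length := by
      have := hrect _ hmem; omega
    rw [PySem.List.pyGet?_natCast, List.getElem?_eq_getElem hlen]
    rw [List.getD_eq_getElem board [] hlt, List.getD_eq_getElem _ none hlen]
    simp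
  -- evaluate B's column
  rw [PySem.List.pyGetD_natCast]
  have hcollen : (board.map (fun r => r.getD t none)).length = board.length := by simp
  have hB := pvRuns_getD_ge_iff (board.map (fun r => r.getD t none)) k s (by omega)
  rw [hB]
  have hcol : ∀ j : Nat, j < s →
      ((board.map (fun r => r.getD t none)).getD (k + j) none =
        (board.getD (k + j) []).getD t none) := by
    intro j hj
    have hlt : k + j < board.length := by omega
    rw [List.getD_eq_getElem _ none (by omega : k + j < (board.map (fun r => r.getD t none)).length),
      List.getElem_map, List.getD_eq_getElem board [] hlt]
  constructor
  · intro h j hj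
    rw [hcol j hj]
    exact (hA j hj).1 (h j hj)
  · intro h j hj
    apply (hA j hj).2
    have := h j hj
    rwa [hcol j hj] at this

-- ===== VERDICT (by name: the statement is the Claim_ definition above) =====
-- under rect, the column count of pvCols is at least the number of rows
theorem pvCols_count_ge (board : List (List (Option Int))) (hne : board ≠ [])
    (hrect : ∀ row ∈ board, board.length ≤ row.length) :
    board.length ≤ (board.map (fun r => r.length)).min?.getD 0 := by
  rcases hmin : (board.map (fun r => r.length)).min? with _ | m
  · exfalso
    rw [List.min?_eq_none_iff, List.map_eq_nil_iff] at hmin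
    exact hne hmin
  · rw [hmin, Option.getD_some]
    obtain ⟨hmem, -⟩ := List.min?_eq_some_iff.1 hmin
    rcases List.mem_map.1 hmem with ⟨r, hr, rfl⟩
    exact hrect r hr

theorem get_possible_placements_spec : Claim_equal_get_possible_placements := by
  intro board size hdom hpre
  obtain ⟨hsz, hwrect⟩ := hpre
  unfold Spec_get_possible_placements get_possible_placements get_possible_placements_alt
  rw [PySem.List.enumerate_eq_map_pyRange board ([] : List (Option Int)), List.foldl_map]
  simp only [PySem.List.len_eq]
  by_cases hbig : (board.length : Int) < size
  · -- size > len(board): A's inner ranges are empty, B returns [] up front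
    rw [if_pos hbig, PySem.List.pyRange_one_eq_nil (by omega)]
    simp only [List.foldl_nil]
    rw [PySem.List.foldl_ignore]
  · rw [if_neg hbig]
    have hrect : ∀ row ∈ board, board.length ≤ row.length := hwrect (by omega)
    apply PySem.List.foldl_congr_mem
    intro acc y hy
    rw [PySem.List.mem_pyRange_one] at hy
    obtain ⟨t, rfl⟩ : ∃ t : Nat, y = (t : Int) := ⟨y.toNat, by omega⟩
    have htn : t < board.length := by simpa using hy.2
    apply PySem.List.foldl_congr_mem
    intro acc2 x hx
    rw [PySem.List.mem_pyRange_one] at hx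
    have hr : PySem.Raise.InRange board.length (t : Int) := by
      simp [PySem.Raise.InRange]; omega
    have hrowmem : PySem.List.pyGetD board (t : Int) [] ∈ board :=
      PySem.List.pyGetD_mem board [] hr
    have hH := hcond_iff (PySem.List.pyGetD board (t : Int) []) board.length size x hsz hx.1
      (by omega) (hrect _ hrowmem)
    have hV := vcond_iff board t x size hsz htn hx.1 (by omega) hrect
    have e1 : PySem.List.pyGetD (pvHruns board) (t : Int) [] =
        pvRuns (PySem.List.slice (PySem.List.pyGetD board (t : Int) [])
          none (some (board.length : Int))) := by
      unfold pvHruns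
      rw [PySem.List.pyGetD_eq_getElem _ _ hy.1 (by simpa using hy.2),
        PySem.List.pyGetD_eq_getElem _ _ hy.1 (by simpa using hy.2), List.getElem_map]
    have e2 : PySem.List.pyGetD (pvVruns board) (t : Int) [] =
        pvRuns (board.map (fun r => r.getD t none)) := by
      unfold pvVruns pvCols
      have hcnt : t < (board.map (fun r => r.length)).min?.getD 0 := by
        have := pvCols_count_ge board (by intro h; subst h; simp at htn) hrect
        omega
      rw [PySem.List.pyGetD_natCast]
      rw [List.getD_eq_getElem _ [] (by simpa using hcnt)]
      rw [List.getElem_map, List.getElem_map, List.getElem_range]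
    simp only [e1, e2, hH, hV]
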